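-- pv_equiv track=rewrite | github.com/inesalmeida101464/ATP2022 | TPC6/aulaP6.py | titcomp
-- ===== SOURCE A (Python) =====
-- def titcomp(obras):
--     lista=[]
--     dici={}
--     for nome,_,_,_,comp,*_ in obras:
--         if comp in dici.keys():
--             dici[comp].append(nome)
--         else:
--             dici[comp]=[nome]
--     lista.append(dici)
--     return lista
-- ===== SOURCE B (Python) =====
-- def titcomp(obras):
--     # alternative decomposition: dedup composers first, then collect each group's
--     # titles with a comprehension per composer (return value only; no shared lists)
--     comps = list(dict.fromkeys(o[4] for o in obras))
--     return [{c: [o[0] for o in obras if o[4] == c] for c in comps}]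
-- ===== Notes on version B (the rewrite author's own statement) =====
-- stated objective: alternative
-- what changed: Replaces the single-pass dict accumulation (lookup-and-append per work) with a two-phase strategy: ordered dedup of composers, then one filtering comprehension per composer to build each group.
import Mathlib
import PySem

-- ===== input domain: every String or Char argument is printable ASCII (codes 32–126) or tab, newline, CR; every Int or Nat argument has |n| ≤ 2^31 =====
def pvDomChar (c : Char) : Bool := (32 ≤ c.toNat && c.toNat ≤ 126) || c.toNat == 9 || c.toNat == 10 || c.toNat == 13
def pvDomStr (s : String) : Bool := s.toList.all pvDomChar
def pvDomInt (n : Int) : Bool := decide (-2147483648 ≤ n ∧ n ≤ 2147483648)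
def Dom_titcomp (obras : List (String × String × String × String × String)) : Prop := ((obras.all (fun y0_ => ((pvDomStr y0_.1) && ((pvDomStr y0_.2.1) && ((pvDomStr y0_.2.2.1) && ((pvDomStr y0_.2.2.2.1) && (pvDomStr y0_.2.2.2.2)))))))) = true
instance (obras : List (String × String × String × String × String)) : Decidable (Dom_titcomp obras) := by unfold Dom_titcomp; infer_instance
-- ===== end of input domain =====

-- ===== PORT A =====
-- B replaces A's single-pass dict accumulation by dedup-then-filter per composer; return value only.
def titcomp (obras : List (String × String × String × String × String)) : List (List (String × List String)) :=
  let dici : PySem.Dict String (List String) :=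
    obras.foldl
      (fun d o =>
        if d.contains o.2.2.2.2 then d.modify o.2.2.2.2 [] (fun l => l ++ [o.1])
        else d.insert o.2.2.2.2 [o.1])
      PySem.Dict.empty
  ([] : List (List (String × List String))) ++ [dici.items]

-- ===== PORT B =====
def titcomp_alt (obras : List (String × String × String × String × String)) : List (List (String × List String)) :=
  let comps := PySem.List.dedup (obras.map (fun o => o.2.2.2.2))
  [comps.map (fun c => (c, (obras.filter (fun o => o.2.2.2.2 == c)).map (fun o => o.1)))]

-- ===== PRECONDITION & SPEC =====
def Spec_titcomp (obras : List (String × String × String × String × String)) (out : List (List (String × List String))) : Prop := out = titcomp_alt obras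
instance (obras : List (String × String × String × String × String)) (out : List (List (String × List String))) : Decidable (Spec_titcomp obras out) := by unfold Spec_titcomp; infer_instance

-- ===== CLAIM (what is proved, stated in full; the proofs are below) =====
def Claim_equal_titcomp : Prop := ∀ (obras : List (String × String × String × String × String)), Dom_titcomp obras → Spec_titcomp obras (titcomp obras)

-- ===== LEMMAS AND PROOFS =====

-- A's branched step is exactly a dict.modify with default []
lemma titcomp_step_eq (d : PySem.Dict String (List String)) (o : String × String × String × String × String) :
    (if d.contains o.2.2.2.2 then d.modify o.2.2.2.2 [] (fun l => l ++ [o.1])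
     else d.insert o.2.2.2.2 [o.1])
      = d.modify o.2.2.2.2 [] (fun l => l ++ [o.1]) := by
  by_cases h : d.contains o.2.2.2.2
  · simp [h]
  · simp only [Bool.not_eq_true] at h
    simp [h, PySem.Dict.modify, PySem.Dict.getD_of_not_contains]

-- ===== VERDICT (by name: the statement is the Claim_ definition above) =====
theorem titcomp_spec : Claim_equal_titcomp := by
  intro obras _
  show titcomp obras = titcomp_alt obras
  unfold titcomp titcomp_alt
  simp only [titcomp_step_eq, List.nil_append]
  have key : obras.foldl (fun (d : PySem.Dict String (List String)) o => d.modify o.2.2.2.2 [] (fun l => l ++ [o.1])) PySem.Dict.empty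
      = (obras.map (fun o => (o.2.2.2.2, o.1))).foldl (fun d (p : String × String) => d.modify p.1 [] (fun l => l ++ [p.2])) PySem.Dict.empty :=
    Eq.symm (List.foldl_map (f := fun o : String × String × String × String × String => (o.2.2.2.2, o.1))
      (g := fun (d : PySem.Dict String (List String)) (p : String × String) => d.modify p.1 [] (fun l => l ++ [p.2])))
  rw [key]
  have hnd : ((obras.map (fun o => (o.2.2.2.2, o.1))).foldl (fun (d : PySem.Dict String (List String)) (p : String × String) => d.modify p.1 [] (fun l => l ++ [p.2])) PySem.Dict.empty).keys.Nodup :=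
    PySem.Dict.nodup_keys_foldl_modify_key _ (fun (p : String × String) => p.1) [] (fun _ (p : String × String) => (fun l => l ++ [p.2])) _ (by simp)
  rw [PySem.Dict.items_eq_map_keys _ hnd []]
  rw [PySem.Dict.keys_foldl_modify_key]
  simp only [PySem.Dict.keys_empty, PySem.Set.update_nil_left, List.map_map, Function.comp_def]
  refine congrArg (fun l => [l]) (List.map_congr_left fun c _ => ?_)
  rw [PySem.Dict.getD_foldl_modify_append]
  simp [List.filter_map, List.map_map, Function.comp_def]
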